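-- pv_equiv track=rewrite | github.com/alicepywong/CS61A | discussion/disc05_mutability&OOP.py | add_this_many
-- ===== SOURCE A (Python) =====
-- def add_this_many(x, el, s):
--     """ Adds el to the end of s the number of times x occurs in s.
--     >>> s = [1, 2, 4, 2, 1]
--     >>> add_this_many(1, 5, s)
--     >>> s
--     [1, 2, 4, 2, 1, 5, 5]
--     >>> add_this_many(2, 2, s)
--     >>> s
--     [1, 2, 4, 2, 1, 5, 5, 2, 2]
--     """
--     "*** YOUR CODE HERE ***"
--     cnt = 0
--     for i in s:
--         if i == x:
--             cnt += 1
--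
--     while cnt > 0:
--         s.append(el)
--         cnt -= 1
--
--     return s
-- ===== SOURCE B (Python) =====
-- def add_this_many(x, el, s):
--     n = len(s)
--     for i in range(n):
--         if s[i] == x:
--             s.append(el)
--     return s
-- ===== Notes on version B (the rewrite author's own statement) =====
-- stated objective: simpler
-- what changed: Replaces the count-then-append two-phase version with a single index-bounded pass over the original length that appends el inline at each match (no counter, no second loop).
import Mathlib
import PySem

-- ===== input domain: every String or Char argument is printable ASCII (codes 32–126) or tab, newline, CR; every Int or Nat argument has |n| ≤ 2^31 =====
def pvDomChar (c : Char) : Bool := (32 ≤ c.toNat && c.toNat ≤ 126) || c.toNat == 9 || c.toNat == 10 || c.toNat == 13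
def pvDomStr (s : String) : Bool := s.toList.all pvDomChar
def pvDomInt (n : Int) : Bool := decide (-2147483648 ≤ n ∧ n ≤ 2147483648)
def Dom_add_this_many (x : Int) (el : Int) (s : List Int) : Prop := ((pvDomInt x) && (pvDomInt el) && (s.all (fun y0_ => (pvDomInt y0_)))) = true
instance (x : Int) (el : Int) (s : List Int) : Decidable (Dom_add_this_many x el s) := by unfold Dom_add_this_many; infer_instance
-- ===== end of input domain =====

-- B replaces A's count-then-append two-phase version with a single index-bounded pass
-- appending el inline at each match (simpler: no counter, no second loop); A mutates s
-- in place and B performs the same mutation, the proof is about the returned list.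


-- ===== PORT A =====
-- A's 'while cnt > 0: s.append(el); cnt -= 1'
def addWhile (el : Int) (cnt : Int) (s : List Int) : List Int :=
  if h : 0 < cnt then addWhile el (cnt - 1) (s ++ [el]) else s
termination_by cnt.toNat
decreasing_by omega

def add_this_many (x : Int) (el : Int) (s : List Int) : List Int :=
  -- cnt = 0; for i in s: if i == x: cnt += 1
  let cnt : Int := s.foldl (fun c i => if i = x then c + 1 else c) 0
  addWhile el cnt s

-- ===== PORT B =====
def add_this_many_alt (x : Int) (el : Int) (s : List Int) : List Int :=
  -- n = len(s); for i in range(n): if s[i] == x: s.append(el)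
  let n : Int := (s.length : Int)
  (PySem.List.pyRange 0 n 1).foldl
    (fun acc i =>
      match PySem.List.pyGet? acc i with   -- s[i]; i < n ≤ len(acc), so never none
      | some v => if v = x then acc ++ [el] else acc
      | none => acc)
    s

-- ===== PRECONDITION & SPEC =====
def Spec_add_this_many (x : Int) (el : Int) (s : List Int) (out : List Int) : Prop := out = add_this_many_alt x el s
instance (x : Int) (el : Int) (s : List Int) (out : List Int) : Decidable (Spec_add_this_many x el s out) := by unfold Spec_add_this_many; infer_instance

-- ===== CLAIM (what is proved, stated in full; the proofs are below) =====
def Claim_equal_add_this_many : Prop := ∀ (x : Int) (el : Int) (s : List Int), Dom_add_this_many x el s → Spec_add_this_many x el s (add_this_many x el s)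

-- ===== LEMMAS AND PROOFS =====

theorem foldl_count (x : Int) (s : List Int) (c : Int) :
    s.foldl (fun c i => if i = x then c + 1 else c) c = c + (s.count x : Int) := by
  induction s generalizing c with
  | nil => simp
  | cons a t ih =>
      simp only [List.foldl_cons, List.count_cons, ih]
      by_cases h : a = x <;> simp [h] <;> push_cast <;> ring

theorem addWhile_replicate (el : Int) (n : Nat) (s : List Int) :
    addWhile el (n : Int) s = s ++ List.replicate n el := by
  induction n generalizing s with
  | zero => rw [addWhile]; simp
  | succ m ih =>
      rw [addWhile]
      have h : (0 : Int) < ((m : Nat) + 1 : Nat) := by positivity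
      simp only [h, dite_true, reduceDIte]
      have : ((m + 1 : Nat) : Int) - 1 = (m : Int) := by push_cast; ring
      rw [this, ih]
      simp [List.replicate_succ, List.append_assoc]

theorem add_this_many_eq (x el : Int) (s : List Int) :
    add_this_many x el s = s ++ List.replicate (s.count x) el := by
  unfold add_this_many
  simp only [foldl_count, zero_add]
  exact addWhile_replicate el (s.count x) s

theorem alt_loop (x el : Int) (s : List Int) :
    ∀ (k : Nat) (t : List Int), k ≤ s.length →
      (PySem.List.pyRange (k : Int) (s.length : Int) 1).foldl
        (fun acc i =>
          match PySem.List.pyGet? acc i with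
          | some v => if v = x then acc ++ [el] else acc
          | none => acc)
        (s ++ t)
      = s ++ t ++ List.replicate ((s.drop k).count x) el := by
  intro k t hk
  induction hd : s.length - k generalizing k t with
  | zero =>
      have hke : k = s.length := by omega
      subst hke
      rw [PySem.List.pyRange_one_eq_nil (by omega)]
      simp
  | succ m ih =>
      have hlt : k < s.length := by omega
      rw [PySem.List.pyRange_one_cons (by exact_mod_cast hlt)]
      simp only [List.foldl_cons]
      have hget : PySem.List.pyGet? (s ++ t) (k : Int) = some s[k] := by
        rw [PySem.List.pyGet?_natCast]
        rw [List.getElem?_append_left hlt]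
        simp [hlt]
      rw [hget]
      have hdrop : s.drop k = s[k] :: s.drop (k + 1) := List.drop_eq_getElem_cons hlt
      have hcast : ((k : Int) + 1) = ((k + 1 : Nat) : Int) := by push_cast; ring
      by_cases hx : s[k] = x
      · simp only [hx, if_true, reduceIte]
        rw [show s ++ t ++ [el] = s ++ (t ++ [el]) by simp, hcast,
            ih (k + 1) (t ++ [el]) (by omega) (by omega)]
        rw [hdrop]
        simp only [List.count_cons, hx, List.append_assoc, beq_self_eq_true, if_true,
          reduceIte]
        simp [List.replicate_succ]
      · simp only [hx, if_false, reduceIte]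
        rw [hcast, ih (k + 1) t (by omega) (by omega), hdrop, List.count_cons]
        simp [hx]

theorem add_this_many_alt_eq (x el : Int) (s : List Int) :
    add_this_many_alt x el s = s ++ List.replicate (s.count x) el := by
  unfold add_this_many_alt
  have := alt_loop x el s 0 [] (by omega)
  simpa using this

-- ===== VERDICT (by name: the statement is the Claim_ definition above) =====
theorem add_this_many_spec : Claim_equal_add_this_many := by
  intro x el s _
  unfold Spec_add_this_many
  rw [add_this_many_eq, add_this_many_alt_eq]
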